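-- pv_equiv track=rewrite | github.com/H2WO4/Python | Sorts/StalinPlot.py | StalinSort
-- ===== SOURCE A (Python) =====
-- def StalinSort(toSort):
--     toSortCopy = toSort.copy()
--     previous = 0
--     toDelete = []
--     for i in range(len(toSortCopy)):
--         if previous <= toSortCopy[i]:
--             previous = toSortCopy[i]
--         else:
--             toDelete.append(i)
--     toDelete.reverse()
--     for i in toDelete:
--         del toSortCopy[i]
--     return toSortCopy
-- ===== SOURCE B (Python) =====
-- def StalinSort(toSort):
--     out = []
--     previous = 0
--     for value in toSort:
--         if previous <= value:
--             out.append(value)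
--             previous = value
--     return out
-- ===== Notes on version B (the rewrite author's own statement) =====
-- stated objective: faster
-- what changed: Single forward pass appending kept elements to the output, instead of recording offending indices and then deleting them one by one from a copy.
import Mathlib
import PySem

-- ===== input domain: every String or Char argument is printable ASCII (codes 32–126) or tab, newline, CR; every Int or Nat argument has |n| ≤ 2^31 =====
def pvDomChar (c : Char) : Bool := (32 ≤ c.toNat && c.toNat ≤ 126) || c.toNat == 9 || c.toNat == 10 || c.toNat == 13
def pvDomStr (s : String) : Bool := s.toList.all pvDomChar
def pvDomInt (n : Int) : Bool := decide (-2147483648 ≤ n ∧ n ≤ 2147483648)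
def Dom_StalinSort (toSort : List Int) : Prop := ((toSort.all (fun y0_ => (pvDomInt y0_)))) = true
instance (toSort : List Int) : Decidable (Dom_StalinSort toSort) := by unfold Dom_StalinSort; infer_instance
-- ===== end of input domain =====

-- B replaces A's mark-indices-then-delete-by-index scheme (O(n^2)) by one forward pass
-- appending kept elements (O(n)); equal output on every input.

-- ===== PORT A =====
-- first loop: over range(len(toSortCopy)) reading toSortCopy[i]; the list is unchanged
-- during it, so it is ported as a fold over enumerate (exact); state = (previous, toDelete).
-- 'del toSortCopy[i]' is List.eraseIdx i.toNat — exact here since every recorded index is ≥ 0.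
def StalinSort (toSort : List Int) : List Int :=
  let toSortCopy := toSort
  let st := (PySem.List.enumerate toSortCopy 0).foldl
      (fun (st : Int × List Int) iv =>
        if st.1 ≤ iv.2 then (iv.2, st.2) else (st.1, st.2 ++ [iv.1])) (0, ([] : List Int))
  let toDelete := st.2.reverse
  toDelete.foldl (fun acc i => acc.eraseIdx i.toNat) toSortCopy

-- ===== PORT B =====
def StalinSort_alt (toSort : List Int) : List Int :=
  (toSort.foldl
    (fun (st : Int × List Int) value =>
      if st.1 ≤ value then (value, st.2 ++ [value]) else st) (0, ([] : List Int))).2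

-- ===== PRECONDITION & SPEC =====
def Spec_StalinSort (toSort : List Int) (out : List Int) : Prop := out = StalinSort_alt toSort
instance (toSort : List Int) (out : List Int) : Decidable (Spec_StalinSort toSort out) := by unfold Spec_StalinSort; infer_instance

-- ===== CLAIM (what is proved, stated in full; the proofs are below) =====
def Claim_equal_StalinSort : Prop := ∀ (toSort : List Int), Dom_StalinSort toSort → Spec_StalinSort toSort (StalinSort toSort)

-- ===== LEMMAS AND PROOFS =====

-- the kept subsequence, as a structural recursion (reference function for both ports)
def stalinKeep (p : Int) : List Int → List Int
  | [] => []
  | x :: xs => if p ≤ x then x :: stalinKeep x xs else stalinKeep p xs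

-- the indices A's first loop records, starting at absolute index s
def stalinMarks (p s : Int) : List Int → List Int
  | [] => []
  | x :: xs => if p ≤ x then stalinMarks x (s + 1) xs else s :: stalinMarks p (s + 1) xs

theorem alt_fold (l : List Int) : ∀ (p : Int) (acc : List Int),
    (l.foldl (fun (st : Int × List Int) value =>
      if st.1 ≤ value then (value, st.2 ++ [value]) else st) (p, acc)).2
    = acc ++ stalinKeep p l := by
  induction l with
  | nil => intro p acc; simp [stalinKeep]
  | cons x xs ih =>
    intro p acc
    by_cases h : p ≤ x <;> simp [stalinKeep, h, ih]

theorem marks_fold (l : List Int) : ∀ (p s : Int) (acc : List Int),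
    ((PySem.List.enumerate l s).foldl
      (fun (st : Int × List Int) iv =>
        if st.1 ≤ iv.2 then (iv.2, st.2) else (st.1, st.2 ++ [iv.1])) (p, acc))
    = ((l.foldl (fun q x => if q ≤ x then x else q) p), acc ++ stalinMarks p s l) := by
  induction l with
  | nil => intro p s acc; simp [stalinMarks, PySem.List.enumerate_nil]
  | cons x xs ih =>
    intro p s acc
    rw [PySem.List.enumerate_cons]
    by_cases h : p ≤ x <;> simp [stalinMarks, h, ih]

theorem eraseIdx_at (pre : List Int) (x : Int) (rest : List Int) :
    (pre ++ x :: rest).eraseIdx pre.length = pre ++ rest := by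
  induction pre with
  | nil => simp
  | cons y ys ih => simp [ih]

theorem delete_marks (l : List Int) : ∀ (p : Int) (pre : List Int),
    (stalinMarks p (pre.length : Int) l).reverse.foldl
      (fun acc i => acc.eraseIdx i.toNat) (pre ++ l)
    = pre ++ stalinKeep p l := by
  induction l with
  | nil => intro p pre; simp [stalinMarks, stalinKeep]
  | cons x xs ih =>
    intro p pre
    have hlen : (pre.length : Int) + 1 = ((pre ++ [x]).length : Int) := by simp
    have hsplit : pre ++ x :: xs = (pre ++ [x]) ++ xs := by simp
    by_cases h : p ≤ x
    · rw [show stalinMarks p (pre.length : Int) (x :: xs)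
            = stalinMarks x ((pre ++ [x]).length : Int) xs by
          rw [stalinMarks, if_pos h, hlen], hsplit, ih x (pre ++ [x])]
      simp [stalinKeep, h]
    · rw [show stalinMarks p (pre.length : Int) (x :: xs)
            = (pre.length : Int) :: stalinMarks p ((pre ++ [x]).length : Int) xs by
          rw [stalinMarks, if_neg h, hlen]]
      rw [List.reverse_cons, List.foldl_append, hsplit, ih p (pre ++ [x])]
      simp only [List.foldl_cons, List.foldl_nil, Int.toNat_natCast, List.append_assoc,
        List.singleton_append]
      rw [eraseIdx_at pre x (stalinKeep p xs)]
      simp [stalinKeep, h]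

-- ===== VERDICT (by name: the statement is the Claim_ definition above) =====
theorem StalinSort_spec : Claim_equal_StalinSort := by
  intro toSort _
  unfold Spec_StalinSort StalinSort StalinSort_alt
  simp only [marks_fold, alt_fold]
  have := delete_marks toSort 0 []
  simpa using this
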